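-- pv_equiv track=rewrite | github.com/Enzu83/hyper_smash_bros | game/functions.py | best_ratio
-- ===== SOURCE A (Python) =====
-- def best_ratio(new_res):
--
--     h = new_res[1]
--     w = int(h*960/544)
--     while w > new_res[0]:
--         h -= 1
--         w -= 1
--     res_1 = (w,h)
--
--     w = new_res[0]
--     h = int(w*544/960)
--     while h > new_res[1]:
--         w -= 1
--         h -= 1
--     res_2 = (w,h)
--
--     if res_2[1] > res_1[1]:
--         return res_2
--     else:
--         return res_1
-- ===== SOURCE B (Python) =====
-- def _trunc(a, b):
--     # truncating division (toward zero) for positive b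
--     return a // b if a >= 0 else -((-a) // b)
--
-- def best_ratio(new_res):
--     W, H = new_res[0], new_res[1]
--     w1 = _trunc(H * 960, 544)
--     d1 = max(w1 - W, 0)
--     res_1 = (w1 - d1, H - d1)
--     h2 = _trunc(W * 544, 960)
--     d2 = max(h2 - H, 0)
--     res_2 = (W - d2, h2 - d2)
--     return res_2 if res_2[1] > res_1[1] else res_1
-- ===== Notes on version B (the rewrite author's own statement) =====
-- stated objective: faster
-- what changed: Replaces A's two unit-decrement while-loops with a closed-form subtraction (max(gap,0)) and exact truncating integer division, removing the O(pixel-gap) iteration.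
-- outside the precondition, e.g. on best_ratio((5,)): A raises IndexError, B raises IndexError
import Mathlib
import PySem

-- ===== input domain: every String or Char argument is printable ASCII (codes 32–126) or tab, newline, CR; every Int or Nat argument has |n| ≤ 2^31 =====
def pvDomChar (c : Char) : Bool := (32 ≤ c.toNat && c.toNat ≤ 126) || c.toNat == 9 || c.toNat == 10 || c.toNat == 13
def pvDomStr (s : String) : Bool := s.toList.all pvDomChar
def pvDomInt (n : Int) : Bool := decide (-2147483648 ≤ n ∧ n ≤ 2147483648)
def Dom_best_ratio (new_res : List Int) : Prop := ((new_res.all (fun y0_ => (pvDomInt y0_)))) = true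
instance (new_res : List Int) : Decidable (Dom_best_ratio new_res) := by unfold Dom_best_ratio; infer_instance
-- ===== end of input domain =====

-- B replaces A's two unit-decrement while-loops by closed-form arithmetic (max with 0); faster (O(1) vs O(|pixel gap|)).
-- Python's `int(x*960/544)` (float, then truncation toward zero) is ported as exact truncating
-- integer division, which coincides with it for all |x| ≤ 2^31 (the stated Dom).

-- ===== PORT A =====
-- truncation-toward-zero division by a positive divisor, as Python's int(a/b)
def pvTruncDivA (a b : Int) : Int :=
  if a ≥ 0 then PySem.Int.floordiv a b else -(PySem.Int.floordiv (-a) b)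

-- `while w > target: h -= 1; w -= 1`
def pvLoop1 (target w h : Int) : Int × Int :=
  if w > target then pvLoop1 target (w - 1) (h - 1) else (w, h)
termination_by (w - target).toNat
decreasing_by omega

-- `while h > target: w -= 1; h -= 1`
def pvLoop2 (target w h : Int) : Int × Int :=
  if h > target then pvLoop2 target (w - 1) (h - 1) else (w, h)
termination_by (h - target).toNat
decreasing_by omega

def best_ratio (new_res : List Int) : List Int :=
  match new_res with
  | r0 :: r1 :: _ =>
    let h := r1
    let w := pvTruncDivA (h * 960) 544          -- int(h*960/544)
    let res_1 := pvLoop1 r0 w h                 -- while w > new_res[0]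
    let w2 := r0
    let h2 := pvTruncDivA (w2 * 544) 960         -- int(w*544/960)
    let res_2 := pvLoop2 r1 w2 h2               -- while h > new_res[1]
    if res_2.2 > res_1.2 then [res_2.1, res_2.2] else [res_1.1, res_1.2]
  | _ => []                                     -- IndexError in Python; excluded by Pre_

-- ===== PORT B =====
-- B's _trunc helper (same conditional body as Source B)
def pvTruncDivB (a b : Int) : Int :=
  if a ≥ 0 then PySem.Int.floordiv a b else -(PySem.Int.floordiv (-a) b)

def best_ratio_alt (new_res : List Int) : List Int :=
  match PySem.List.pyGet? new_res 0, PySem.List.pyGet? new_res 1 with   -- W, H = new_res[0], new_res[1]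
  | some W, some H =>
    let w1 := pvTruncDivB (H * 960) 544
    let d1 := max (w1 - W) 0
    let res_1 := (w1 - d1, H - d1)
    let h2 := pvTruncDivB (W * 544) 960
    let d2 := max (h2 - H) 0
    let res_2 := (W - d2, h2 - d2)
    if res_2.2 > res_1.2 then [res_2.1, res_2.2] else [res_1.1, res_1.2]
  | _, _ => []

-- ===== PRECONDITION & SPEC =====
-- Pre_ excludes lists with fewer than two elements, on which Python A raises IndexError.
def Pre_best_ratio (new_res : List Int) : Prop := 2 ≤ new_res.length
instance (new_res : List Int) : Decidable (Pre_best_ratio new_res) := by unfold Pre_best_ratio; infer_instance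
def pvWitness_best_ratio : List Int := [960, 544]

def Spec_best_ratio (new_res : List Int) (out : List Int) : Prop := out = best_ratio_alt new_res
instance (new_res : List Int) (out : List Int) : Decidable (Spec_best_ratio new_res out) := by unfold Spec_best_ratio; infer_instance

-- ===== CLAIM (what is proved, stated in full; the proofs are below) =====
def Claim_equal_best_ratio : Prop := ∀ (new_res : List Int), Dom_best_ratio new_res → Pre_best_ratio new_res → Spec_best_ratio new_res (best_ratio new_res)

-- ===== LEMMAS AND PROOFS =====
theorem pvLoop1_eq (t w h : Int) : pvLoop1 t w h = (w - max (w - t) 0, h - max (w - t) 0) := by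
  fun_induction pvLoop1 t w h with
  | case1 w h hgt ih =>
    rw [ih]; simp only [Prod.mk.injEq]; constructor <;> omega
  | case2 w h hle =>
    simp only [Prod.mk.injEq]; constructor <;> omega

theorem pvLoop2_eq (t w h : Int) : pvLoop2 t w h = (w - max (h - t) 0, h - max (h - t) 0) := by
  fun_induction pvLoop2 t w h with
  | case1 w h hgt ih =>
    rw [ih]; simp only [Prod.mk.injEq]; constructor <;> omega
  | case2 w h hle =>
    simp only [Prod.mk.injEq]; constructor <;> omega

-- ===== VERDICT (by name: the statement is the Claim_ definition above) =====
theorem best_ratio_spec : Claim_equal_best_ratio := by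
  intro new_res _ hpre
  match new_res with
  | r0 :: r1 :: rest =>
    have h0 : (0:Int) ≤ (rest.length:Int) + 1 := by positivity
    simp [h0, Spec_best_ratio, best_ratio, best_ratio_alt, pvLoop1_eq, pvLoop2_eq, pvTruncDivA, pvTruncDivB, PySem.List.pyGet?, PySem.List.pyIdx?]
  | [] => simp [Pre_best_ratio] at hpre
  | [_] => simp [Pre_best_ratio] at hpre
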